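-- pv_equiv track=rewrite | github.com/Volzheva/Algoritms_sem2_lab1 | 17_new.py | horse
-- ===== SOURCE A (Python) =====
-- def horse(n):
--     button = [0] * 10
--     if n == 1:
--         return 8
--     else:
--         button = [2, 1, 2, 1, 2, 0, 2, 2, 2, 2]
--         arr = [0] * 10
--         for i in range(n - 2):
--             arr[0] = button[4] + button[6]
--             arr[1] = button[6] + button[8]
--             arr[2] = button[7] + button[9]
--             arr[3] = button[4] + button[8]
--             arr[4] = button[0] + button[3] + button[9]
--             arr[5] = 0
--             arr[6] = button[0] + button[1] + button[7]
--             arr[7] = button[2] + button[6]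
--             arr[8] = button[1] + button[3]
--             arr[9] = button[2] + button[4]
--             button = arr
--             arr = [0] * 10
--
--     return sum(button) % 10**9
-- ===== SOURCE B (Python) =====
-- MOD = 10 ** 9
--
-- # knight-move adjacency on the phone keypad: M[i][j] = 1 iff a knight on key j can move to key i
-- M = [
--     [0, 0, 0, 0, 1, 0, 1, 0, 0, 0],
--     [0, 0, 0, 0, 0, 0, 1, 0, 1, 0],
--     [0, 0, 0, 0, 0, 0, 0, 1, 0, 1],
--     [0, 0, 0, 0, 1, 0, 0, 0, 1, 0],
--     [1, 0, 0, 1, 0, 0, 0, 0, 0, 1],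
--     [0, 0, 0, 0, 0, 0, 0, 0, 0, 0],
--     [1, 1, 0, 0, 0, 0, 0, 1, 0, 0],
--     [0, 0, 1, 0, 0, 0, 1, 0, 0, 0],
--     [0, 1, 0, 1, 0, 0, 0, 0, 0, 0],
--     [0, 0, 1, 0, 1, 0, 0, 0, 0, 0],
-- ]
--
-- V0 = [2, 1, 2, 1, 2, 0, 2, 2, 2, 2]
--
--
-- def _mat_mul(a, b):
--     return [[sum(a[i][k] * b[k][j] for k in range(10)) % MOD for j in range(10)]
--             for i in range(10)]
--
--
-- def _mat_pow(a, e):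
--     if e == 0:
--         return [[1 if i == j else 0 for j in range(10)] for i in range(10)]
--     h = _mat_pow(a, e // 2)
--     h2 = _mat_mul(h, h)
--     return h2 if e % 2 == 0 else _mat_mul(h2, a)
--
--
-- def horse(n):
--     if n == 1:
--         return 8
--     p = _mat_pow(M, max(n - 2, 0))
--     w = [sum(p[i][k] * V0[k] for k in range(10)) % MOD for i in range(10)]
--     return sum(w) % MOD
-- ===== Notes on version B (the rewrite author's own statement) =====
-- stated objective: faster
-- what changed: replaces the step-by-step linear recurrence (n-2 vector updates on ever-growing ints) by binary exponentiation of the 10x10 knight-move transition matrix mod 1e9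
import Mathlib
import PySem

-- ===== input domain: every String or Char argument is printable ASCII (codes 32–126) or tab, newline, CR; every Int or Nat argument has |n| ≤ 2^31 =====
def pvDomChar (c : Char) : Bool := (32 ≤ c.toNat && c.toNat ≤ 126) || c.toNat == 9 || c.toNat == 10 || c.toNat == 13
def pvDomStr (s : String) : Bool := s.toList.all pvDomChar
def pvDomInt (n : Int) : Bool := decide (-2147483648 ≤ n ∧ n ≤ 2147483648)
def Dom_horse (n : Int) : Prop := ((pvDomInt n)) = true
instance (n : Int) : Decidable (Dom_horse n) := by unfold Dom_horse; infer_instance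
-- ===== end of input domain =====

-- B replaces A's n-2 vector-update loop by binary exponentiation of the 10x10 knight-move
-- transition matrix mod 10^9 (objective: faster, O(log n) matrix products instead of O(n) steps).


-- ===== PORT A =====
-- one iteration of A's for-loop body (the ten fixed-slot assignments building arr from button)
def horseStep (b : List Int) : List Int :=
  [b[4]! + b[6]!, b[6]! + b[8]!, b[7]! + b[9]!, b[4]! + b[8]!, b[0]! + b[3]! + b[9]!, 0,
   b[0]! + b[1]! + b[7]!, b[2]! + b[6]!, b[1]! + b[3]!, b[2]! + b[4]!]

def horse (n : Int) : Int :=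
  if n = 1 then 8
  else
    PySem.Int.mod
      (((PySem.List.pyRange 0 (n - 2) 1).foldl (fun b _ => horseStep b)
        [2, 1, 2, 1, 2, 0, 2, 2, 2, 2]).sum)
      (10 ^ 9)

-- ===== PORT B =====
-- knight-move adjacency matrix M of Source B (M[i][j] = 1 iff key j reaches key i), a list of rows
def bMat : List (List Int) :=
  [[0, 0, 0, 0, 1, 0, 1, 0, 0, 0],
   [0, 0, 0, 0, 0, 0, 1, 0, 1, 0],
   [0, 0, 0, 0, 0, 0, 0, 1, 0, 1],
   [0, 0, 0, 0, 1, 0, 0, 0, 1, 0],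
   [1, 0, 0, 1, 0, 0, 0, 0, 0, 1],
   [0, 0, 0, 0, 0, 0, 0, 0, 0, 0],
   [1, 1, 0, 0, 0, 0, 0, 1, 0, 0],
   [0, 0, 1, 0, 0, 0, 1, 0, 0, 0],
   [0, 1, 0, 1, 0, 0, 0, 0, 0, 0],
   [0, 0, 1, 0, 1, 0, 0, 0, 0, 0]]

def bV0 : List Int := [2, 1, 2, 1, 2, 0, 2, 2, 2, 2]

-- _mat_mul of Source B: the 10x10 comprehension of dot products, each reduced mod 10^9
def bMul (a b : List (List Int)) : List (List Int) :=
  List.ofFn (fun i : Fin 10 =>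
    List.ofFn (fun j : Fin 10 =>
      (∑ k : Fin 10, (a[i.val]!)[k.val]! * (b[k.val]!)[j.val]!) % 1000000000))

-- _mat_pow of Source B (binary exponentiation; e = 0 gives the identity matrix)
def bPow (a : List (List Int)) (e : Nat) : List (List Int) :=
  if e = 0 then List.ofFn (fun i : Fin 10 => List.ofFn (fun j : Fin 10 => if i = j then 1 else 0))
  else
    let h := bPow a (e / 2)
    let h2 := bMul h h
    if e % 2 = 0 then h2 else bMul h2 a
  termination_by e
  decreasing_by exact Nat.div_lt_self (Nat.pos_of_ne_zero (by assumption)) (by omega)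

def horse_alt (n : Int) : Int :=
  if n = 1 then 8
  else
    let p := bPow bMat (max (n - 2) 0).toNat
    let w : List Int :=
      List.ofFn (fun i : Fin 10 => (∑ k : Fin 10, (p[i.val]!)[k.val]! * bV0[k.val]!) % 1000000000)
    w.sum % 1000000000

-- ===== PRECONDITION & SPEC =====
def Spec_horse (n : Int) (out : Int) : Prop := out = horse_alt n
instance (n : Int) (out : Int) : Decidable (Spec_horse n out) := by unfold Spec_horse; infer_instance

-- ===== CLAIM (what is proved, stated in full; the proofs are below) =====
def Claim_equal_horse : Prop := ∀ (n : Int), Dom_horse n → Spec_horse n (horse n)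

-- ===== LEMMAS AND PROOFS =====

-- casts into ZMod (10^9), where A's unreduced arithmetic and B's reduced arithmetic coincide
def cM (a : List (List Int)) : Matrix (Fin 10) (Fin 10) (ZMod 1000000000) :=
  Matrix.of fun i j => (((a[i.val]!)[j.val]! : Int) : ZMod 1000000000)

def cL (l : List Int) : Fin 10 → ZMod 1000000000 := fun i => ((l[i.val]! : Int) : ZMod 1000000000)

theorem cast_mod (x : Int) : ((x % 1000000000 : Int) : ZMod 1000000000) = (x : ZMod 1000000000) := by
  have := ZMod.intCast_mod x 1000000000
  simpa using this

theorem ofFn_get {α : Type} [Inhabited α] (f : Fin 10 → α) (i : Fin 10) :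
    (List.ofFn f)[i.val]! = f i := by
  have h : i.val < (List.ofFn f).length := by simp
  rw [getElem!_pos (c := List.ofFn f) (i := i.val) h, List.getElem_ofFn]

theorem cM_mul (a b : List (List Int)) : cM (bMul a b) = cM a * cM b := by
  funext i j
  simp only [cM, bMul, ofFn_get, Matrix.of_apply, cast_mod]
  simp [Matrix.mul_apply]

theorem cM_pow (a : List (List Int)) (e : Nat) : cM (bPow a e) = (cM a) ^ e := by
  induction e using Nat.strong_induction_on with
  | _ e ih =>
    rw [bPow]
    by_cases h0 : e = 0
    · subst h0
      simp only [pow_zero]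
      funext i j
      show (((List.ofFn (fun i : Fin 10 =>
          List.ofFn (fun j : Fin 10 => if i = j then (1 : Int) else 0)))[i.val]!)[j.val]! :
            ZMod 1000000000) = _
      rw [ofFn_get, ofFn_get]
      by_cases h : i = j <;> simp [h, Matrix.one_apply]
    · rw [if_neg h0]
      have hlt : e / 2 < e := Nat.div_lt_self (Nat.pos_of_ne_zero h0) (by omega)
      by_cases hp : e % 2 = 0
      · rw [if_pos hp]
        rw [cM_mul, ih _ hlt, ← pow_add]
        congr 1
        omega
      · rw [if_neg hp]
        rw [cM_mul, cM_mul, ih _ hlt, ← pow_add, ← pow_succ]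
        congr 1
        omega

-- A's loop as function iteration
def itA (k : Nat) : List Int := horseStep^[k] [2, 1, 2, 1, 2, 0, 2, 2, 2, 2]

theorem foldl_const {α β : Type} (f : β → β) (l : List α) (b : β) :
    l.foldl (fun acc _ => f acc) b = f^[l.length] b := by
  induction l generalizing b with
  | nil => rfl
  | cons x xs ih => simp [List.foldl_cons, ih, Function.iterate_succ_apply]

theorem step_cast (a0 a1 a2 a3 a4 a5 a6 a7 a8 a9 : Int) :
    cL (horseStep [a0, a1, a2, a3, a4, a5, a6, a7, a8, a9]) =
      (cM bMat).mulVec (cL [a0, a1, a2, a3, a4, a5, a6, a7, a8, a9]) := by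
  funext i
  fin_cases i <;>
    simp [cL, horseStep, cM, bMat, Matrix.mulVec, dotProduct, Fin.sum_univ_succ] <;> ring

theorem itA_shape (k : Nat) :
    ∃ a0 a1 a2 a3 a4 a5 a6 a7 a8 a9 : Int,
      itA k = [a0, a1, a2, a3, a4, a5, a6, a7, a8, a9] := by
  cases k with
  | zero => exact ⟨_, _, _, _, _, _, _, _, _, _, rfl⟩
  | succ m =>
    rw [itA, Function.iterate_succ_apply', horseStep]
    exact ⟨_, _, _, _, _, _, _, _, _, _, rfl⟩

theorem itA_cast (k : Nat) :
    cL (itA k) = ((cM bMat) ^ k).mulVec (cL [2, 1, 2, 1, 2, 0, 2, 2, 2, 2]) := by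
  induction k with
  | zero => simp [itA]
  | succ m ih =>
    obtain ⟨a0, a1, a2, a3, a4, a5, a6, a7, a8, a9, hm⟩ := itA_shape m
    have : itA (m + 1) = horseStep [a0, a1, a2, a3, a4, a5, a6, a7, a8, a9] := by
      rw [itA, Function.iterate_succ_apply', ← itA, hm]
    rw [this, step_cast, ← hm, ih, Matrix.mulVec_mulVec, ← pow_succ']

theorem sum_itA_cast (k : Nat) :
    (((itA k).sum : Int) : ZMod 1000000000) = ∑ i : Fin 10, cL (itA k) i := by
  obtain ⟨a0, a1, a2, a3, a4, a5, a6, a7, a8, a9, hm⟩ := itA_shape k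
  rw [hm]
  simp [cL, Fin.sum_univ_succ]

theorem mod_eq_of_cast_eq (x y : Int)
    (h : (x : ZMod 1000000000) = (y : ZMod 1000000000)) :
    x % 1000000000 = y % 1000000000 := by
  have := (ZMod.intCast_eq_intCast_iff x y 1000000000).mp h
  simpa [Int.ModEq] using this

-- ===== VERDICT (by name: the statement is the Claim_ definition above) =====
theorem horse_spec : Claim_equal_horse := by
  intro n _
  unfold Spec_horse horse horse_alt
  by_cases h1 : n = 1
  · simp [h1]
  · rw [if_neg h1, if_neg h1]
    have hmod : (10 : Int) ^ 9 = 1000000000 := by norm_num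
    rw [PySem.Int.mod_eq_emod_of_pos (by norm_num), hmod]
    set k : Nat := (max (n - 2) 0).toNat with hk
    have hlen : (PySem.List.pyRange 0 (n - 2) 1).length = k := by
      rw [PySem.List.length_pyRange_one]; omega
    rw [foldl_const horseStep, hlen]
    apply mod_eq_of_cast_eq
    have hA := sum_itA_cast k
    rw [itA] at hA
    rw [hA]
    have hB : ∀ i : Fin 10,
        ((((∑ j : Fin 10, ((bPow bMat k)[i.val]!)[j.val]! * bV0[j.val]!) % 1000000000 : Int)) :
            ZMod 1000000000) =
          ((cM bMat) ^ k).mulVec (cL [2, 1, 2, 1, 2, 0, 2, 2, 2, 2]) i := by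
      intro i
      rw [cast_mod, ← cM_pow]
      have hv : cL [2, 1, 2, 1, 2, 0, 2, 2, 2, 2] = fun j : Fin 10 => ((bV0[j.val]! : Int) :
          ZMod 1000000000) := by
        funext j; fin_cases j <;> simp [cL, bV0]
      rw [hv]
      simp [Matrix.mulVec, dotProduct, cM]
    have hsum : (((List.ofFn (fun i : Fin 10 =>
        (∑ j : Fin 10, ((bPow bMat k)[i.val]!)[j.val]! * bV0[j.val]!) % 1000000000)).sum : Int) :
          ZMod 1000000000) =
        ∑ i : Fin 10, ((((∑ j : Fin 10, ((bPow bMat k)[i.val]!)[j.val]! * bV0[j.val]!) %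
          1000000000 : Int)) : ZMod 1000000000) := by
      rw [List.sum_ofFn]
      push_cast
      rfl
    rw [hsum]
    have hit := itA_cast k
    rw [itA] at hit
    rw [hit]
    exact Finset.sum_congr rfl fun i _ => (hB i).symm
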